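-- pv_equiv track=rewrite | github.com/MotohiroOGAWA/Ms2z | lib/calc_formula.py | dict_to_formula
-- ===== SOURCE A (Python) =====
-- def dict_to_formula(element_counts):
--     """
--     Converts a dictionary with element symbols as keys and their respective counts as values
--     into a chemical formula string, ensuring that the formula is ordered according to the Hill system.
--
--     Args:
--         element_counts (dict): A dictionary with elements as keys and their counts as values.
--                                 Example: {'C': 6, 'H': 12, 'O': 6}
--
--     Returns:
--         str: The chemical formula string (e.g., 'C6H12O6').
--     """
--     # Initialize an empty list to store the ordered element and count pairs
--     formula_list = []
--
--     # First, add 'C' (if present) followed by 'H' (if present)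
--     element_counts = element_counts.copy()
--     if 'C' in element_counts:
--         count = element_counts.pop('C')
--         if count == 1:
--             formula_list.append('C')
--         else:
--             formula_list.append(f'C{count}')
--
--     if 'H' in element_counts:
--         count = element_counts.pop('H')
--         if count == 1:
--             formula_list.append('H')
--         else:
--             formula_list.append(f'H{count}')
--
--     # Sort the remaining elements alphabetically
--     for element in sorted(element_counts):
--         count = element_counts[element]
--         if count == 1:
--             formula_list.append(element)
--         else:
--             formula_list.append(f'{element}{count}')
--
--     # Join the element and count pairs into a single string to form the chemical formula
--     return ''.join(formula_list)
-- ===== SOURCE B (Python) =====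
-- def dict_to_formula(element_counts):
--     def hill(e):
--         return '0' if e == 'C' else '1' if e == 'H' else '2' + e
--
--     def go(pairs):
--         if not pairs:
--             return []
--         e, c = min(pairs, key=lambda p: hill(p[0]))
--         return [e if c == 1 else f'{e}{c}'] + go([p for p in pairs if p[0] != e])
--
--     return ''.join(go(list(element_counts.items())))
-- ===== Notes on version B (the rewrite author's own statement) =====
-- stated objective: alternative
-- what changed: Replaces A's dict copy/pop of 'C' and 'H' plus a library sort of the remaining keys with a recursive selection over the item list: repeatedly extract the Hill-least remaining item with min() and emit its fragment, so no sort call and no dict mutation occur.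
import Mathlib
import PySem

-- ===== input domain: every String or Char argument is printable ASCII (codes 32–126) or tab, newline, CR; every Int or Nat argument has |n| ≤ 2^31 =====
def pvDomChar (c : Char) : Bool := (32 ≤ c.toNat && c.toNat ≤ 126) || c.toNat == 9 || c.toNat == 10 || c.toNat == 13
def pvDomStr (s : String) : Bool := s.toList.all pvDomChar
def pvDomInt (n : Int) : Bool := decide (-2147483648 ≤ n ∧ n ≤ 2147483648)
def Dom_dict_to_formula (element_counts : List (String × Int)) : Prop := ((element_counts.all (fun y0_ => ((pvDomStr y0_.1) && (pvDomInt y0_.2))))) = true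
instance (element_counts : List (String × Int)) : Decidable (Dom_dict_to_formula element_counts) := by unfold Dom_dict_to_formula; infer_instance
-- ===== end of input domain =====

-- B replaces A's copy/pop-'C'/pop-'H' phases plus a library sort of the remaining keys by a
-- recursive selection over the item list: repeatedly extract the Hill-least remaining item via
-- min() and emit its fragment (objective: alternative; no sort call, no dict mutation).

-- ===== PORT A =====
-- format an element entry exactly as the Python does: element if count == 1 else f'{element}{count}'
-- (f-string concatenation written as ''-join of the two pieces, which is exact)
def pvEntry (d : PySem.Dict String Int) (element : String) : String :=
  let count := (d.get? element).getD 0   -- lookup of a key known to be present: .getD 0 is exact there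
  if count = 1 then element else PySem.Str.join "" [element, PySem.Int.toStr count]

-- A's body on the dict itself ('element_counts' after the .copy())
def dictToFormulaCoreA (d : PySem.Dict String Int) : String :=
  -- if 'C' in element_counts: count = element_counts.pop('C'); append 'C' or f'C{count}'
  let step1 : List String × PySem.Dict String Int :=
    match d.pop? "C" with
    | some (count, d') =>
        (if count = 1 then ["C"] else [PySem.Str.join "" ["C", PySem.Int.toStr count]], d')
    | none => ([], d)
  -- if 'H' in element_counts: count = element_counts.pop('H'); append 'H' or f'H{count}'
  let step2 : List String × PySem.Dict String Int :=
    match step1.2.pop? "H" with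
    | some (count, d') =>
        (step1.1 ++ (if count = 1 then ["H"] else [PySem.Str.join "" ["H", PySem.Int.toStr count]]), d')
    | none => step1
  -- for element in sorted(element_counts): append element or f'{element}{count}'
  let formula_list :=
    (PySem.List.sorted step2.2.keys (fun e => e)).foldl
      (fun acc element => acc ++ [pvEntry step2.2 element]) step2.1
  PySem.Str.join "" formula_list

def dict_to_formula (element_counts : List (String × Int)) : String :=
  dictToFormulaCoreA (PySem.Dict.ofList element_counts)   -- the Python argument is a dict

-- ===== PORT B =====
-- hill = lambda e: '0' if e == 'C' else '1' if e == 'H' else '2' + e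
def pvHillKey (e : String) : String :=
  if e = "C" then "0" else if e = "H" then "1" else PySem.Str.join "" ["2", e]

-- e if c == 1 else f'{e}{c}'
def pvFmt (p : String × Int) : String :=
  if p.2 = 1 then p.1 else PySem.Str.join "" [p.1, PySem.Int.toStr p.2]

-- go(pairs): recursive selection of the Hill-least remaining item (Python's min = first extremal)
def pvGo (pairs : List (String × Int)) : List String :=
  match h : PySem.List.min? pairs (fun p => pvHillKey p.1) with
  | none => []
  | some m =>
      pvFmt m :: pvGo (pairs.filter (fun p => !(p.1 == m.1)))
termination_by pairs.length
decreasing_by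
  have hm := PySem.List.min?_mem h
  simp only [List.unattach_filter, List.unattach_attach]
  exact (List.length_filter_lt_length_iff_exists
    (p := fun p => !(p.1 == m.1))).mpr ⟨m, hm, by simp⟩

def dict_to_formula_alt (element_counts : List (String × Int)) : String :=
  PySem.Str.join "" (pvGo (PySem.Dict.ofList element_counts).items)

-- ===== PRECONDITION & SPEC =====
def Spec_dict_to_formula (element_counts : List (String × Int)) (out : String) : Prop := out = dict_to_formula_alt element_counts
instance (element_counts : List (String × Int)) (out : String) : Decidable (Spec_dict_to_formula element_counts out) := by unfold Spec_dict_to_formula; infer_instance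

-- ===== CLAIM (what is proved, stated in full; the proofs are below) =====
def Claim_equal_dict_to_formula : Prop := ∀ (element_counts : List (String × Int)), Dom_dict_to_formula element_counts → Spec_dict_to_formula element_counts (dict_to_formula element_counts)

-- ===== LEMMAS AND PROOFS =====

-- proof-side normal form: one keyed sort of the keys, then one format pass
def dictToFormulaNF (d : PySem.Dict String Int) : String :=
  PySem.Str.join "" ((PySem.List.sorted d.keys pvHillKey).map (fun e => pvEntry d e))

-- keys of an erased dict are the filtered keys (PySem has no erase lemmas; erase filters the items)
theorem pv_keys_erase (d : PySem.Dict String Int) (k : String) :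
    (d.erase k).keys = d.keys.filter (fun e => !(e == k)) := by
  simp [PySem.Dict.erase, PySem.Dict.keys, List.filter_map, Function.comp_def]

theorem pv_find?_filter_ne (t : List (String × Int)) (k k' : String) (h : k' ≠ k) :
    List.find? (fun p => p.1 == k') (t.filter (fun p => !(p.1 == k))) =
      List.find? (fun p => p.1 == k') t := by
  induction t with
  | nil => rfl
  | cons p t ih =>
      by_cases hk : p.1 = k
      · have h1 : (p.1 == k) = true := by simp [hk]
        have h2 : (p.1 == k') = false := beq_eq_false_iff_ne.mpr (by rw [hk]; exact fun e => h e.symm)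
        simp [List.filter_cons, h1, List.find?_cons_of_neg, h2, ih]
      · have h1 : (p.1 == k) = false := beq_eq_false_iff_ne.mpr hk
        by_cases hk' : p.1 = k'
        · have h2 : (p.1 == k') = true := by simp [hk']
          simp [List.filter_cons, h1, List.find?_cons_of_pos, h2]
        · have h2 : (p.1 == k') = false := beq_eq_false_iff_ne.mpr hk'
          simp [List.filter_cons, h1, List.find?_cons_of_neg, h2, ih]

theorem pv_get?_erase_of_ne (d : PySem.Dict String Int) (k k' : String) (h : k' ≠ k) :
    (d.erase k).get? k' = d.get? k' := by
  simp only [PySem.Dict.erase, PySem.Dict.get?]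
  rw [pv_find?_filter_ne d.items k k' h]

-- erasing an absent key is the identity
theorem pv_erase_of_get?_none (d : PySem.Dict String Int) (k : String)
    (h : d.get? k = none) : d.erase k = d := by
  apply PySem.Dict.ext
  simp only [PySem.Dict.get?, Option.map_eq_none_iff, List.find?_eq_none] at h
  simp only [PySem.Dict.erase]
  rw [List.filter_eq_self]
  intro p hp
  simpa using h p hp

theorem pv_nodup_keys_erase (d : PySem.Dict String Int) (k : String) (h : d.keys.Nodup) :
    (d.erase k).keys.Nodup := by
  rw [pv_keys_erase]; exact h.filter _

theorem pv_hillKey_C : pvHillKey "C" = "0" := by simp [pvHillKey]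

theorem pv_hillKey_H : pvHillKey "H" = "1" := by simp [pvHillKey]

-- the Hill key on a 'rest' element, as a character list
theorem pv_hillKey_other (e : String) (h1 : e ≠ "C") (h2 : e ≠ "H") :
    (pvHillKey e).toList = '2' :: e.toList := by
  simp [pvHillKey, h1, h2, PySem.Str.join, PySem.Chars.join, List.intercalate]

theorem pv_hillKey_C_lt_H : pvHillKey "C" < pvHillKey "H" := by
  rw [pv_hillKey_C, pv_hillKey_H, String.lt_iff_toList_lt]
  have e0 : ("0" : String).toList = ['0'] := by decide
  have e1 : ("1" : String).toList = ['1'] := by decide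
  rw [e0, e1, List.cons_lt_cons_iff]
  left; decide

theorem pv_hillKey_lt_other (x e : String) (hx : x = "C" ∨ x = "H")
    (h1 : e ≠ "C") (h2 : e ≠ "H") : pvHillKey x < pvHillKey e := by
  rw [String.lt_iff_toList_lt, pv_hillKey_other e h1 h2]
  have e0 : ("0" : String).toList = ['0'] := by decide
  have e1 : ("1" : String).toList = ['1'] := by decide
  rcases hx with hx | hx <;> subst hx
  · rw [pv_hillKey_C, e0, List.cons_lt_cons_iff]; left; decide
  · rw [pv_hillKey_H, e1, List.cons_lt_cons_iff]; left; decide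

theorem pv_hillKey_mono (a b : String) (ha1 : a ≠ "C") (ha2 : a ≠ "H")
    (hb1 : b ≠ "C") (hb2 : b ≠ "H") (h : a < b) : pvHillKey a < pvHillKey b := by
  rw [String.lt_iff_toList_lt, pv_hillKey_other a ha1 ha2, pv_hillKey_other b hb1 hb2,
    List.cons_lt_cons_iff]
  exact Or.inr ⟨rfl, String.lt_iff_toList_lt.mp h⟩

-- the Hill key is injective
theorem pv_hillKey_inj (a b : String) (h : pvHillKey a = pvHillKey b) : a = b := by
  have ht : (pvHillKey a).toList = (pvHillKey b).toList := by rw [h]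
  by_cases haC : a = "C" <;> by_cases hbC : b = "C" <;>
    by_cases haH : a = "H" <;> by_cases hbH : b = "H" <;> try (subst_vars; rfl)
  all_goals subst_vars
  all_goals first
  | (exfalso
     first
     | (rw [pv_hillKey_C, pv_hillKey_H] at ht; exact absurd ht (by decide))
     | (rw [pv_hillKey_H, pv_hillKey_C] at ht; exact absurd ht (by decide))
     | (rw [pv_hillKey_C] at ht; rw [pv_hillKey_other b hbC hbH] at ht
        have : ('0' : Char) = '2' := by
          have := congrArg (fun l => l.headI) ht; simpa using this
        exact absurd this (by decide))
     | (rw [pv_hillKey_H] at ht; rw [pv_hillKey_other b hbC hbH] at ht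
        have : ('1' : Char) = '2' := by
          have := congrArg (fun l => l.headI) ht; simpa using this
        exact absurd this (by decide))
     | (rw [pv_hillKey_other a haC haH, pv_hillKey_C] at ht
        have : ('2' : Char) = '0' := by
          have := congrArg (fun l => l.headI) ht; simpa using this
        exact absurd this (by decide))
     | (rw [pv_hillKey_other a haC haH, pv_hillKey_H] at ht
        have : ('2' : Char) = '1' := by
          have := congrArg (fun l => l.headI) ht; simpa using this
        exact absurd this (by decide)))
  | (rw [pv_hillKey_other a haC haH, pv_hillKey_other b hbC hbH] at ht
     have : a.toList = b.toList := by simpa using ht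
     exact String.toList_inj.mp this)

-- the filtered keys, with 'C' and 'H' re-inserted in front, are a permutation of all keys
theorem pv_perm_CH (ks : List String) (h : ks.Nodup) :
    ((if "C" ∈ ks then ["C"] else []) ++
      ((if "H" ∈ ks then ["H"] else []) ++
        ks.filter (fun a => (!(a == "H")) && (!(a == "C"))))).Perm ks := by
  rw [List.perm_iff_count]
  intro a
  by_cases haC : a = "C"
  · subst haC
    have h0 : List.count "C" (ks.filter (fun a => (!(a == "H")) && (!(a == "C")))) = 0 := by
      apply List.count_eq_zero_of_not_mem; simp
    by_cases hC : "C" ∈ ks <;> by_cases hH : "H" ∈ ks <;>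
      simp_all [List.count_append, List.count_eq_one_of_mem h, List.count_eq_zero_of_not_mem]
  · by_cases haH : a = "H"
    · subst haH
      have h0 : List.count "H" (ks.filter (fun a => (!(a == "H")) && (!(a == "C")))) = 0 := by
        apply List.count_eq_zero_of_not_mem; simp
      by_cases hC : "C" ∈ ks <;> by_cases hH : "H" ∈ ks <;>
        simp_all [List.count_append, List.count_eq_one_of_mem h, List.count_eq_zero_of_not_mem]
    · have hf : List.count a (ks.filter (fun a => (!(a == "H")) && (!(a == "C")))) =
          List.count a ks := List.count_filter (by simp [haC, haH])
      have hH' : ¬ ("H" = a) := fun hh => haH hh.symm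
      have hC' : ¬ ("C" = a) := fun hh => haC hh.symm
      by_cases hC : "C" ∈ ks <;> by_cases hH : "H" ∈ ks <;>
        simp_all [List.count_append, List.count_cons]

-- the single keyed sort decomposes into A's three phases
theorem pv_sorted_hill (d : PySem.Dict String Int) (hnd : d.keys.Nodup) :
    PySem.List.sorted d.keys pvHillKey =
      (if d.contains "C" then ["C"] else []) ++
        ((if d.contains "H" then ["H"] else []) ++
          PySem.List.sorted (((d.erase "C").erase "H").keys) (fun e => e)) := by
  have hkeys2 : ((d.erase "C").erase "H").keys =
      d.keys.filter (fun a => (!(a == "H")) && (!(a == "C"))) := by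
    rw [pv_keys_erase, pv_keys_erase, List.filter_filter]
  have hmemC : d.contains "C" = decide ("C" ∈ d.keys) :=
    PySem.Dict.contains_eq_decide_mem_keys d "C"
  have hmemH : d.contains "H" = decide ("H" ∈ d.keys) :=
    PySem.Dict.contains_eq_decide_mem_keys d "H"
  have hrest : ∀ e ∈ PySem.List.sorted (((d.erase "C").erase "H").keys) (fun e => e),
      e ≠ "C" ∧ e ≠ "H" ∧ e ∈ d.keys := by
    intro e he
    rw [PySem.List.mem_sorted, hkeys2, List.mem_filter] at he
    refine ⟨?_, ?_, he.1⟩ <;> · intro hh; subst hh; simp at he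
  apply PySem.List.sorted_eq_of_perm_of_pairwise_lt
  · -- permutation
    have hp : (PySem.List.sorted (((d.erase "C").erase "H").keys) (fun e => e)).Perm
        (d.keys.filter (fun a => (!(a == "H")) && (!(a == "C")))) := by
      rw [← hkeys2]; exact PySem.List.sorted_perm _ _ _
    refine (List.Perm.append_left _ (List.Perm.append_left _ hp)).trans ?_
    rw [hmemC, hmemH]
    simp only [decide_eq_true_eq]
    exact pv_perm_CH d.keys hnd
  · -- strictly increasing under the Hill key
    rw [List.pairwise_append, List.pairwise_append]
    refine ⟨?_, ⟨?_, ?_, ?_⟩, ?_⟩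
    · split <;> simp
    · split <;> simp
    · -- rest is pairwise strictly hillKey-increasing
      have hle := PySem.List.sorted_pairwise (((d.erase "C").erase "H").keys) (fun e => e)
      have hnd2 : (PySem.List.sorted (((d.erase "C").erase "H").keys) (fun e => e)).Nodup :=
        (PySem.List.sorted_perm _ _ _).nodup_iff.mpr
          (pv_nodup_keys_erase _ _ (pv_nodup_keys_erase _ _ hnd))
      have hlt := hnd2.and hle
      apply List.Pairwise.imp_of_mem (l := _) ?_ hlt
      intro a b ha hb hab
      exact pv_hillKey_mono a b (hrest a ha).1 (hrest a ha).2.1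
        (hrest b hb).1 (hrest b hb).2.1 (lt_of_le_of_ne hab.2 hab.1)
    · -- 'H' before every rest element
      intro a ha b hb
      have haH : a = "H" := by revert ha; split <;> simp_all
      subst haH
      exact pv_hillKey_lt_other _ _ (Or.inr rfl) (hrest b hb).1 (hrest b hb).2.1
    · -- 'C' before 'H' and before every rest element
      intro a ha b hb
      have haC : a = "C" := by revert ha; split <;> simp_all
      subst haC
      rcases (List.mem_append).mp hb with hb | hb
      · have hbH : b = "H" := by revert hb; split <;> simp_all
        subst hbH
        exact pv_hillKey_C_lt_H
      · exact pv_hillKey_lt_other _ _ (Or.inl rfl) (hrest b hb).1 (hrest b hb).2.1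

-- A equals the normal form
theorem pv_core_eq (d : PySem.Dict String Int) (hnd : d.keys.Nodup) :
    dictToFormulaCoreA d = dictToFormulaNF d := by
  have hCne : ("H" : String) ≠ "C" := by decide
  have hgetH : (d.erase "C").get? "H" = d.get? "H" := pv_get?_erase_of_ne d "C" "H" hCne
  have hrestEq : ∀ e ∈ PySem.List.sorted (((d.erase "C").erase "H").keys) (fun e => e),
      pvEntry ((d.erase "C").erase "H") e = pvEntry d e := by
    intro e he
    rw [PySem.List.mem_sorted] at he
    rw [pv_keys_erase, List.mem_filter] at he
    obtain ⟨he1, he2⟩ := he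
    rw [pv_keys_erase, List.mem_filter] at he1
    unfold pvEntry
    rw [pv_get?_erase_of_ne _ _ _ (by simpa using he2),
      pv_get?_erase_of_ne _ _ _ (by simpa using he1.2)]
  unfold dictToFormulaCoreA dictToFormulaNF
  rw [pv_sorted_hill d hnd,
    PySem.Dict.contains_eq_isSome_get? d "C", PySem.Dict.contains_eq_isSome_get? d "H"]
  simp only [PySem.Dict.pop?]
  cases hC : d.get? "C" with
  | some c =>
      have eC : (if c = 1 then ["C"] else [PySem.Str.join "" ["C", PySem.Int.toStr c]]) =
          [pvEntry d "C"] := by simp only [pvEntry, hC, Option.getD_some]; split <;> rfl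
      cases hH : d.get? "H" with
      | some h =>
          have eH : (if h = 1 then ["H"] else [PySem.Str.join "" ["H", PySem.Int.toStr h]]) =
              [pvEntry d "H"] := by simp only [pvEntry, hH, Option.getD_some]; split <;> rfl
          simp only [hgetH, hH, hC, Option.map_some, Option.isSome_some, if_true,
            PySem.List.foldl_append_singleton_eq_map, List.map_append, List.map_cons, List.map_nil,
            List.map_congr_left hrestEq, eC, eH, List.append_assoc, List.nil_append,
            List.append_nil, List.singleton_append]
          try rfl
      | none =>
          have hEr : (d.erase "C").erase "H" = d.erase "C" :=
            pv_erase_of_get?_none _ _ (hgetH.trans hH)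
          rw [hEr] at hrestEq
          simp only [hgetH, hH, hC, Option.map_some, Option.map_none, Option.isSome_some,
            Option.isSome_none, if_true, Bool.false_eq_true, if_false, hEr,
            PySem.List.foldl_append_singleton_eq_map, List.map_append, List.map_cons, List.map_nil,
            List.map_congr_left hrestEq, eC, List.append_assoc, List.nil_append,
            List.append_nil, List.singleton_append]
          try rfl
  | none =>
      have hdC : d.erase "C" = d := pv_erase_of_get?_none d "C" hC
      rw [hdC] at hgetH hrestEq
      cases hH : d.get? "H" with
      | some h =>
          have eH : (if h = 1 then ["H"] else [PySem.Str.join "" ["H", PySem.Int.toStr h]]) =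
              [pvEntry d "H"] := by simp only [pvEntry, hH, Option.getD_some]; split <;> rfl
          simp only [hdC, hgetH, hH, hC, Option.map_some, Option.map_none, Option.isSome_some,
            Option.isSome_none, if_true, Bool.false_eq_true, if_false,
            PySem.List.foldl_append_singleton_eq_map, List.map_append, List.map_cons, List.map_nil,
            List.map_congr_left hrestEq, eH, List.append_assoc, List.nil_append,
            List.append_nil, List.singleton_append]
          try rfl
      | none =>
          have hEr : d.erase "H" = d := pv_erase_of_get?_none d "H" hH
          rw [hEr] at hrestEq
          simp only [hdC, hgetH, hH, hC, Option.map_none, Option.isSome_none,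
            Bool.false_eq_true, if_false, hEr,
            PySem.List.foldl_append_singleton_eq_map, List.map_append, List.map_nil,
            List.map_congr_left hrestEq, List.nil_append, List.append_nil]
          try rfl

-- with distinct first components, re-consing the minimum in front of the filtered rest permutes
theorem pv_cons_filter_perm (l : List (String × Int)) (hnd : (l.map Prod.fst).Nodup)
    (m : String × Int) (hm : m ∈ l) :
    (m :: l.filter (fun p => !(p.1 == m.1))).Perm l := by
  induction l with
  | nil => cases hm
  | cons q t ih =>
      rcases List.mem_cons.mp hm with h | h
      · subst h
        have hft : t.filter (fun p => !(p.1 == m.1)) = t := by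
          rw [List.filter_eq_self]
          intro p hp
          have : p.1 ≠ m.1 := by
            intro he
            exact (List.nodup_cons.mp hnd).1 (he ▸ List.mem_map.mpr ⟨p, hp, rfl⟩)
          simpa using this
        simp [List.filter_cons, hft]
      · have hq : q.1 ≠ m.1 := by
          intro he
          exact (List.nodup_cons.mp hnd).1 (he.symm ▸ List.mem_map.mpr ⟨m, h, rfl⟩)
        have hq' : (!(q.1 == m.1)) = true := by simpa using hq
        simp only [List.filter_cons, hq', if_true]
        exact (List.Perm.swap q m _).trans
          (List.Perm.cons q (ih (List.nodup_cons.mp hnd).2 h))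

-- selection step: the keyed sort is the minimum followed by the sorted rest
theorem pv_sorted_step (pairs : List (String × Int)) (hnd : (pairs.map Prod.fst).Nodup)
    (m : String × Int) (h : PySem.List.min? pairs (fun p => pvHillKey p.1) = some m) :
    PySem.List.sorted pairs (fun p => pvHillKey p.1) =
      m :: PySem.List.sorted (pairs.filter (fun p => !(p.1 == m.1)))
        (fun p => pvHillKey p.1) := by
  have hm := PySem.List.min?_mem h
  have hfnd : ((pairs.filter (fun p => !(p.1 == m.1))).map Prod.fst).Nodup :=
    hnd.sublist (List.Sublist.map _ List.filter_sublist)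
  have hsub : ∀ b ∈ PySem.List.sorted (pairs.filter (fun p => !(p.1 == m.1)))
      (fun p => pvHillKey p.1), b ∈ pairs ∧ b.1 ≠ m.1 := by
    intro b hb
    rw [PySem.List.mem_sorted, List.mem_filter] at hb
    exact ⟨hb.1, by simpa using hb.2⟩
  apply PySem.List.sorted_eq_of_perm_of_pairwise_lt
  · exact (List.Perm.cons m (PySem.List.sorted_perm _ _ _)).trans
      (pv_cons_filter_perm pairs hnd m hm)
  · constructor
    · intro b hb
      have hb' := hsub b hb
      have hle := PySem.List.min?_isMin h b hb'.1
      refine lt_of_le_of_ne hle (fun he => hb'.2 ?_)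
      exact (pv_hillKey_inj _ _ he).symm
    · have hle := PySem.List.sorted_pairwise (pairs.filter (fun p => !(p.1 == m.1)))
        (fun p => pvHillKey p.1)
      have hfst : (PySem.List.sorted (pairs.filter (fun p => !(p.1 == m.1)))
          (fun p => pvHillKey p.1)).Pairwise (fun a b => a.1 ≠ b.1) :=
        List.pairwise_map.mp
          ((List.Perm.map Prod.fst (PySem.List.sorted_perm _ _ _)).nodup_iff.mpr hfnd)
      refine (hfst.and hle).imp ?_
      intro a b hab
      refine lt_of_le_of_ne hab.2 (fun he => hab.1 (pv_hillKey_inj _ _ he))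

-- selection-sort correctness: B's recursion produces exactly the keyed-sorted fragments
theorem pv_go_eq_sorted (pairs : List (String × Int)) (hnd : (pairs.map Prod.fst).Nodup) :
    pvGo pairs = (PySem.List.sorted pairs (fun p => pvHillKey p.1)).map pvFmt := by
  induction pairs using pvGo.induct with
  | case1 pairs h =>
      rw [pvGo]
      split
      · rw [PySem.List.min?_eq_none_iff] at h
        subst h
        simp [PySem.List.sorted]
      · next m h' => rw [h'] at h; cases h
  | case2 pairs m h ih =>
      have hfnd : ((pairs.filter (fun p => !(p.1 == m.1))).map Prod.fst).Nodup :=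
        hnd.sublist (List.Sublist.map _ List.filter_sublist)
      rw [pvGo]
      split
      · next h' => rw [h'] at h; cases h
      · next m' h' =>
          rw [h'] at h
          injection h with hm'
          subst hm'
          simp only [List.unattach_filter, List.unattach_attach] at ih
          rw [ih hfnd, pv_sorted_step pairs hnd m' h', List.map_cons]

-- first find? in a nodup-key association list finds the pair itself
theorem pv_find?_self (l : List (String × Int)) (hnd : (l.map Prod.fst).Nodup)
    (p : String × Int) (hp : p ∈ l) : l.find? (fun q => q.1 == p.1) = some p := by
  induction l with
  | nil => cases hp
  | cons q t ih =>
      rcases List.mem_cons.mp hp with h | h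
      · subst h; simp
      · have hne : q.1 ≠ p.1 := by
          intro he
          have : p.1 ∈ t.map Prod.fst := List.mem_map.mpr ⟨p, h, rfl⟩
          rw [← he] at this
          exact (List.nodup_cons.mp hnd).1 this
        rw [List.find?_cons_of_neg (by simpa using hne)]
        exact ih (List.nodup_cons.mp hnd).2 h

-- sorting the items by the Hill key of the key = mapping the sorted keys back to entries
theorem pv_sorted_items (d : PySem.Dict String Int) (hnd : d.keys.Nodup) :
    PySem.List.sorted d.items (fun p => pvHillKey p.1) =
      (PySem.List.sorted d.keys pvHillKey).map (fun e => (e, (d.get? e).getD 0)) := by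
  have hndi : (d.items.map Prod.fst).Nodup := hnd
  have hmapkeys : d.keys.map (fun e => (e, (d.get? e).getD 0)) = d.items := by
    show (d.items.map Prod.fst).map (fun e => (e, (d.get? e).getD 0)) = d.items
    rw [List.map_map]
    refine (List.map_congr_left ?_).trans d.items.map_id
    intro p hp
    have hg : d.get? p.1 = some p.2 := by
      show (d.items.find? (fun q => q.1 == p.1)).map Prod.snd = some p.2
      rw [pv_find?_self d.items hndi p hp]
      rfl
    simp [Function.comp, hg]
  apply PySem.List.sorted_eq_of_perm_of_pairwise_lt
  · exact ((PySem.List.sorted_perm d.keys pvHillKey _).map _).trans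
      (hmapkeys ▸ List.Perm.refl _)
  · refine List.pairwise_map.mpr ?_
    have hle := PySem.List.sorted_pairwise d.keys pvHillKey
    have hnd2 : (PySem.List.sorted d.keys pvHillKey).Nodup :=
      (PySem.List.sorted_perm _ _ _).nodup_iff.mpr hnd
    refine (hnd2.and hle).imp ?_
    intro a b hab
    exact lt_of_le_of_ne hab.2 (fun he => hab.1 (pv_hillKey_inj _ _ he))

-- ===== VERDICT (by name: the statement is the Claim_ definition above) =====
theorem dict_to_formula_spec : Claim_equal_dict_to_formula := by
  intro ec _
  unfold Spec_dict_to_formula dict_to_formula dict_to_formula_alt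
  have hnd := PySem.Dict.nodup_keys_ofList ec
  set d := PySem.Dict.ofList ec with hd
  have hndi : (d.items.map Prod.fst).Nodup := hnd
  rw [pv_core_eq d hnd]
  unfold dictToFormulaNF
  rw [pv_go_eq_sorted d.items hndi, pv_sorted_items d hnd, List.map_map]
  rfl
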